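-- pv_equiv track=rewrite | github.com/tusineav/AdventofCode2023 | Day1/part2.py | fix_nums_backwards
-- ===== SOURCE A (Python) =====
-- def fix_nums_backwards(string):
--     nums = ["one", "two", "three", "four", "five", "six", "seven", "eight", "nine"]
--     for i in reversed(range(0, len(string))):
--         if 'i' <= string[i] <= '9':
--             return string
--         for index, num in enumerate(nums):
--             if string[i: i + len(num)] == num:
--                 string = string[0:i] + str(index + 1) + string[i + len(num):]
--                 return string
--
--     return string
-- ===== SOURCE B (Python) =====
-- def fix_nums_backwards(string):
--     nums = ["one", "two", "three", "four", "five", "six", "seven", "eight", "nine"]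
--     best = -1
--     best_word = ""
--     best_val = 0
--     for val, word in enumerate(nums, 1):
--         j = string.rfind(word)
--         if j > best:
--             best, best_word, best_val = j, word, val
--     if best == -1:
--         return string
--     return string[:best] + str(best_val) + string[best + len(best_word):]
-- ===== Notes on version B (the rewrite author's own statement) =====
-- stated objective: faster
-- what changed: A scans the string backwards character by character, testing all nine number words at each position; B instead does one rfind per number word and splices the digit in at the maximal occurrence start, dropping A's dead digit-range branch ('i' <= c <= '9' never holds).
import Mathlib
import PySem

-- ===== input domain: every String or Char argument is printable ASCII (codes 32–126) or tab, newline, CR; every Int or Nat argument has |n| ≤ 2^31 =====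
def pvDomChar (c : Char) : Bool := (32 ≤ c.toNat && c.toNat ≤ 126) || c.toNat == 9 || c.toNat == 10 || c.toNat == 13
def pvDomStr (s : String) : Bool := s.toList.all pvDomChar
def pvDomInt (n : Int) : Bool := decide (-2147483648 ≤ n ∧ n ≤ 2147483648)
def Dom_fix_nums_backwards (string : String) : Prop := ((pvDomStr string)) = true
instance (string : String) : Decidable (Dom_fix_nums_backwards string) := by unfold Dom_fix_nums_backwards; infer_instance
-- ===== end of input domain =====

-- B replaces A's backward character-by-character scan by one s.rfind per number word,
-- keeping the word whose occurrence starts furthest right (objective: faster, library search).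

-- ===== PORT A =====
-- the nine number words (shared literal; both Pythons spell out the same list)
def pvNums : List (List Char) :=
  ["one".toList, "two".toList, "three".toList, "four".toList, "five".toList,
   "six".toList, "seven".toList, "eight".toList, "nine".toList]

-- inner 'for index, num in enumerate(nums)' loop of A
def pvInnerA (l : List Char) (i : Nat) : List (Int × List Char) → Option (List Char)
  | [] => none
  | (idx, num) :: rest =>
      if PySem.List.slice l (some (i : Int)) (some ((i : Int) + (num.length : Int))) = num then
        some (PySem.List.slice l (some 0) (some (i : Int)) ++ PySem.Int.toChars (idx + 1)
              ++ PySem.List.slice l (some ((i : Int) + (num.length : Int))) none)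
      else pvInnerA l i rest

-- outer 'for i in reversed(range(0, len(string)))' loop of A (fuel m = i + 1)
def pvOuterA (l : List Char) : Nat → List Char
  | 0 => l
  | k + 1 =>
      if 'i' ≤ PySem.List.pyGetD l (k : Int) ' ' ∧ PySem.List.pyGetD l (k : Int) ' ' ≤ '9' then l
      else
        match pvInnerA l k (PySem.List.enumerate pvNums) with
        | some r => r
        | none => pvOuterA l k

def fix_nums_backwards (string : String) : String :=
  String.ofList (pvOuterA string.toList string.toList.length)

-- ===== PORT B =====
-- one fold step of B: keep the occurrence starting furthest right
def pvStepB (l : List Char) (acc : Int × List Char × Int) (p : Int × List Char) : Int × List Char × Int :=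
  let j := PySem.Chars.rfind l p.2
  if acc.1 < j then (j, p.2, p.1) else acc

def fix_nums_backwards_alt (string : String) : String :=
  let l := string.toList
  let r := (PySem.List.enumerate pvNums 1).foldl (pvStepB l) (-1, [], 0)
  if r.1 = -1 then string
  else String.ofList (PySem.List.slice l none (some r.1) ++ PySem.Int.toChars r.2.2
        ++ PySem.List.slice l (some (r.1 + (r.2.1.length : Int))) none)

-- ===== PRECONDITION & SPEC =====
def Spec_fix_nums_backwards (string : String) (out : String) : Prop := out = fix_nums_backwards_alt string
instance (string : String) (out : String) : Decidable (Spec_fix_nums_backwards string out) := by unfold Spec_fix_nums_backwards; infer_instance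

-- ===== CLAIM (what is proved, stated in full; the proofs are below) =====
def Claim_equal_fix_nums_backwards : Prop := ∀ (string : String), Dom_fix_nums_backwards string → Spec_fix_nums_backwards string (fix_nums_backwards string)

-- ===== LEMMAS AND PROOFS =====

-- A's digit test compares against the range 'i'..'9', which is empty: it never fires
lemma pvNoDigit (c : Char) : ¬('i' ≤ c ∧ c ≤ '9') := by
  rintro ⟨h1, h2⟩
  exact absurd (le_trans h1 h2) (by decide)

-- A's slice comparison at position i is a prefix test on l.drop i
lemma pvSliceEqIff (l w : List Char) (i : Nat) :
    PySem.List.slice l (some (i : Int)) (some ((i : Int) + (w.length : Int))) = w ↔ w <+: l.drop i := by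
  rw [PySem.List.slice_natCast_add, List.prefix_iff_eq_take, eq_comm]

lemma pvInnerA_eq_none (l : List Char) (i : Nat) (ps : List (Int × List Char)) :
    pvInnerA l i ps = none ↔ ∀ p ∈ ps, ¬ p.2 <+: l.drop i := by
  induction ps with
  | nil => simp [pvInnerA]
  | cons q rest ih =>
      obtain ⟨idx, num⟩ := q
      rw [pvInnerA]
      by_cases h : PySem.List.slice l (some (i : Int)) (some ((i : Int) + (num.length : Int))) = num
      · simp only [h, reduceIte]
        constructor
        · intro hc; exact absurd hc (by simp)
        · intro hall
          exact absurd ((pvSliceEqIff l num i).mp h) (hall (idx, num) (List.mem_cons_self))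
      · rw [if_neg h, ih]
        constructor
        · intro hall p hp hpre
          rcases List.mem_cons.mp hp with h1 | hp'
          · rw [h1] at hpre; exact h ((pvSliceEqIff l num i).mpr hpre)
          · exact hall p hp' hpre
        · intro hall p hp; exact hall p (List.mem_cons_of_mem _ hp)

lemma pvInnerA_eq_some (l : List Char) (i : Nat) (ps : List (Int × List Char)) (p : Int × List Char)
    (hp : p ∈ ps) (hm : p.2 <+: l.drop i) (hu : ∀ q ∈ ps, q.2 <+: l.drop i → q = p) :
    pvInnerA l i ps = some (PySem.List.slice l (some 0) (some (i : Int)) ++ PySem.Int.toChars (p.1 + 1)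
      ++ PySem.List.slice l (some ((i : Int) + (p.2.length : Int))) none) := by
  induction ps with
  | nil => cases hp
  | cons q rest ih =>
      obtain ⟨idx, num⟩ := q
      rw [pvInnerA]
      by_cases h : PySem.List.slice l (some (i : Int)) (some ((i : Int) + (num.length : Int))) = num
      · have heq : (idx, num) = p := hu (idx, num) (List.mem_cons_self) ((pvSliceEqIff l num i).mp h)
        subst heq
        rw [if_pos h]
      · rw [if_neg h]
        have hp' : p ∈ rest := by
          rcases List.mem_cons.mp hp with h1 | hp'
          · exact absurd ((pvSliceEqIff l num i).mpr (by rw [h1] at hm; exact hm)) h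
          · exact hp'
        exact ih hp' (fun q hq hqm => hu q (List.mem_cons_of_mem _ hq) hqm)

lemma pvOuterA_eq_self (l : List Char) (m : Nat)
    (h : ∀ i < m, pvInnerA l i (PySem.List.enumerate pvNums) = none) : pvOuterA l m = l := by
  induction m with
  | zero => rfl
  | succ k ih =>
      rw [pvOuterA]
      rw [if_neg (pvNoDigit _), h k (Nat.lt_succ_self k)]
      exact ih (fun i hi => h i (Nat.lt_succ_of_lt hi))

lemma pvOuterA_hit (l : List Char) (m : Nat) (i : Nat) (r : List Char) (him : i < m)
    (hr : pvInnerA l i (PySem.List.enumerate pvNums) = some r)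
    (habove : ∀ i', i < i' → i' < m → pvInnerA l i' (PySem.List.enumerate pvNums) = none) :
    pvOuterA l m = r := by
  induction m with
  | zero => cases him
  | succ k ih =>
      rw [pvOuterA, if_neg (pvNoDigit _)]
      rcases Nat.lt_succ_iff_lt_or_eq.mp him with hlt | rfl
      · rw [habove k hlt (Nat.lt_succ_self k)]
        exact ih hlt (fun i' h1 h2 => habove i' h1 (Nat.lt_succ_of_lt h2))
      · rw [hr]

-- rfind.go: -1 with no occurrence up to j, or the largest occurrence start up to j
lemma pvGoCases (l w : List Char) (j : Nat) :
    (PySem.Chars.rfind.go l w j = -1 ∧ ∀ i ≤ j, ¬ w <+: l.drop i) ∨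
    (0 ≤ PySem.Chars.rfind.go l w j ∧ PySem.Chars.rfind.go l w j ≤ (j : Int) ∧
     w <+: l.drop (PySem.Chars.rfind.go l w j).toNat ∧
     ∀ i ≤ j, (PySem.Chars.rfind.go l w j).toNat < i → ¬ w <+: l.drop i) := by
  induction j with
  | zero =>
      rw [show PySem.Chars.rfind.go l w 0 = if w.isPrefixOf l then 0 else -1 from rfl]
      by_cases h : w.isPrefixOf l
      · right
        refine ⟨by simp [h], by simp [h], ?_, ?_⟩
        · simpa [h] using List.isPrefixOf_iff_prefix.mp h
        · intro i hi hlt; omega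
      · left
        refine ⟨by simp [h], ?_⟩
        intro i hi
        interval_cases i
        simpa using fun hc => h (List.isPrefixOf_iff_prefix.mpr hc)
  | succ j ih =>
      have hstep : PySem.Chars.rfind.go l w (j+1) =
          if w.isPrefixOf (l.drop (j+1)) then ((j:Int)+1) else PySem.Chars.rfind.go l w j := by
        rw [PySem.Chars.rfind.go]; norm_num
      by_cases h : w.isPrefixOf (l.drop (j+1))
      · right
        rw [hstep, if_pos h]
        refine ⟨by positivity, le_refl _, ?_, ?_⟩
        · have : ((j:Int)+1).toNat = j + 1 := by omega
          rw [this]; exact List.isPrefixOf_iff_prefix.mp h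
        · intro i hi hlt; omega
      · rw [hstep, if_neg h]
        rcases ih with ⟨h1, h2⟩ | ⟨h0, hle, hpre, hmax⟩
        · left
          refine ⟨h1, ?_⟩
          intro i hi
          rcases Nat.lt_succ_iff_lt_or_eq.mp (Nat.lt_succ_of_le hi) with hlt | rfl
          · exact h2 i (by omega)
          · exact fun hc => h (List.isPrefixOf_iff_prefix.mpr hc)
        · right
          refine ⟨h0, by omega, hpre, ?_⟩
          intro i hi hlt
          rcases Nat.lt_succ_iff_lt_or_eq.mp (Nat.lt_succ_of_le hi) with hlt' | rfl
          · exact hmax i (by omega) hlt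
          · exact fun hc => h (List.isPrefixOf_iff_prefix.mpr hc)

lemma pvGoGeOfPrefix (l w : List Char) (j i : Nat) (hij : i ≤ j) (h : w <+: l.drop i) :
    (i : Int) ≤ PySem.Chars.rfind.go l w j := by
  rcases pvGoCases l w j with ⟨_, hnone⟩ | ⟨h0, _, _, hmax⟩
  · exact absurd h (hnone i hij)
  · by_cases hc : (PySem.Chars.rfind.go l w j).toNat < i
    · exact absurd h (hmax i hij hc)
    · omega

-- B's fold: the result dominates every word's rfind and is the initial acc or one word's record
lemma pvFoldB (l : List Char) (ps : List (Int × List Char)) (acc : Int × List Char × Int) :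
    (∀ p ∈ ps, PySem.Chars.rfind l p.2 ≤ (ps.foldl (pvStepB l) acc).1) ∧
    acc.1 ≤ (ps.foldl (pvStepB l) acc).1 ∧
    ((ps.foldl (pvStepB l) acc) = acc ∨
      ∃ p ∈ ps, (ps.foldl (pvStepB l) acc) = (PySem.Chars.rfind l p.2, p.2, p.1)) := by
  induction ps generalizing acc with
  | nil => exact ⟨by simp, le_refl _, Or.inl rfl⟩
  | cons p rest ih =>
      rw [List.foldl_cons]
      obtain ⟨h1, h2, h3⟩ := ih (pvStepB l acc p)
      have hstep1 : PySem.Chars.rfind l p.2 ≤ (pvStepB l acc p).1 := by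
        by_cases hc : acc.1 < PySem.Chars.rfind l p.2 <;> simp [pvStepB, hc] ; omega
      have hstep2 : acc.1 ≤ (pvStepB l acc p).1 := by
        by_cases hc : acc.1 < PySem.Chars.rfind l p.2 <;> simp [pvStepB, hc] ; omega
      refine ⟨?_, le_trans hstep2 h2, ?_⟩
      · intro q hq
        rcases List.mem_cons.mp hq with rfl | hq'
        · exact le_trans hstep1 h2
        · exact h1 q hq'
      · rcases h3 with heq | ⟨q, hq, heq⟩
        · rw [heq]
          by_cases hc : acc.1 < PySem.Chars.rfind l p.2
          · exact Or.inr ⟨p, List.mem_cons_self, by simp [pvStepB, hc]⟩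
          · exact Or.inl (by simp [pvStepB, hc])
        · exact Or.inr ⟨q, List.mem_cons_of_mem _ hq, heq⟩

lemma pvPrefixUniq : ∀ w1 ∈ pvNums, ∀ w2 ∈ pvNums, w1 <+: w2 → w1 = w2 := by decide

lemma pvNonempty : ∀ w ∈ pvNums, w ≠ [] := by decide

lemma pvNodup : pvNums.Nodup := by decide

-- lift a pair of enumerate(nums) to enumerate(nums, 1): same word, index shifted by one
lemma pvLiftE (q : Int × List Char) (hq : q ∈ PySem.List.enumerate pvNums 0) :
    (q.1 + 1, q.2) ∈ PySem.List.enumerate pvNums 1 := by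
  obtain ⟨k, hk, hpk⟩ := (PySem.List.mem_enumerate_iff _ _ _).mp hq
  exact (PySem.List.mem_enumerate_iff _ _ _).mpr ⟨k, hk, by rw [hpk]; simp; ring⟩

-- a word of pvNums occurring at i forces rfind values ≥ i (so > the fold's best means no match)
lemma pvOccLe (l w : List Char) (i : Nat) (hi : i ≤ l.length) (h : w <+: l.drop i) :
    (i : Int) ≤ PySem.Chars.rfind l w :=
  pvGoGeOfPrefix l w l.length i hi h

-- ===== VERDICT (by name: the statement is the Claim_ definition above) =====
theorem fix_nums_backwards_spec : Claim_equal_fix_nums_backwards := by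
  intro string _
  unfold Spec_fix_nums_backwards fix_nums_backwards fix_nums_backwards_alt
  set l := string.toList with hl
  obtain ⟨h1, h2, h3⟩ := pvFoldB l (PySem.List.enumerate pvNums 1) (-1, [], 0)
  set r := (PySem.List.enumerate pvNums 1).foldl (pvStepB l) (-1, [], 0) with hrdef
  by_cases hneg : r.1 = -1
  · rw [if_pos hneg]
    have houter : pvOuterA l l.length = l := by
      apply pvOuterA_eq_self
      intro i hi
      rw [pvInnerA_eq_none]
      intro q hq hpre
      have hle : (i : Int) ≤ PySem.Chars.rfind l q.2 := pvOccLe l q.2 i (le_of_lt hi) hpre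
      have := h1 (q.1 + 1, q.2) (pvLiftE q hq)
      simp only [hneg] at this
      omega
    rw [houter]
    exact String.ofList_toList
  · rw [if_neg hneg]
    rcases h3 with heq | ⟨p, hpW, hreq⟩
    · exact absurd (by rw [heq]) hneg
    obtain ⟨v, w⟩ := p
    obtain ⟨k, hk, hpk⟩ := (PySem.List.mem_enumerate_iff _ _ _).mp hpW
    have hv : v = 1 + (k : Int) := by rw [Prod.ext_iff] at hpk; exact hpk.1
    have hw : w = pvNums[k] := by rw [Prod.ext_iff] at hpk; exact hpk.2
    have hrf : r.1 = PySem.Chars.rfind l w := by rw [hreq]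
    have hgoeq : PySem.Chars.rfind l w = PySem.Chars.rfind.go l w l.length := rfl
    rcases pvGoCases l w l.length with ⟨hgo, _⟩ | ⟨h0, hle, hpre, hmax⟩
    all_goals rw [← hgoeq] at *
    · exact absurd (by rw [hrf]; exact hgo) hneg
    set i := (PySem.Chars.rfind l w).toNat with hidef
    have hri : r.1 = (i : Int) := by rw [hrf]; omega
    have hwne : w ≠ [] := pvNonempty w (hw ▸ (pvNums.getElem_mem hk))
    have hiltn : i < l.length := by
      by_contra hc
      rw [List.drop_eq_nil_of_le (by omega)] at hpre
      exact hwne (List.prefix_nil.mp hpre)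
    -- the inner loop at position i finds exactly the word w, with index k
    have hinner : pvInnerA l i (PySem.List.enumerate pvNums) =
        some (PySem.List.slice l (some 0) (some (i : Int)) ++ PySem.Int.toChars ((k : Int) + 1)
          ++ PySem.List.slice l (some ((i : Int) + (w.length : Int))) none) := by
      have hmem : ((k : Int), w) ∈ PySem.List.enumerate pvNums 0 :=
        (PySem.List.mem_enumerate_iff _ _ _).mpr ⟨k, hk, by rw [hw]; simp⟩
      have := pvInnerA_eq_some l i (PySem.List.enumerate pvNums) ((k : Int), w) hmem hpre ?_
      · simpa using this
      · intro q hq hqpre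
        obtain ⟨k', hk', hpk'⟩ := (PySem.List.mem_enumerate_iff _ _ _).mp hq
        have hq2 : q.2 = pvNums[k'] := by rw [Prod.ext_iff] at hpk'; exact hpk'.2
        have hcmp := List.prefix_or_prefix_of_prefix hqpre hpre
        have heqw : q.2 = w := by
          rcases hcmp with hc | hc
          · exact pvPrefixUniq q.2 (hq2 ▸ pvNums.getElem_mem hk') w (hw ▸ pvNums.getElem_mem hk) hc
          · exact (pvPrefixUniq w (hw ▸ pvNums.getElem_mem hk) q.2 (hq2 ▸ pvNums.getElem_mem hk') hc).symm
        have hkk : k' = k := (List.Nodup.getElem_inj_iff pvNodup).mp (by rw [← hq2, heqw, hw])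
        have hq1 : q.1 = (k : Int) := by simp [hpk', hkk]
        exact Prod.ext_iff.mpr ⟨hq1, heqw⟩
    have houter : pvOuterA l l.length =
        PySem.List.slice l (some 0) (some (i : Int)) ++ PySem.Int.toChars ((k : Int) + 1)
          ++ PySem.List.slice l (some ((i : Int) + (w.length : Int))) none := by
      apply pvOuterA_hit l l.length i _ hiltn hinner
      intro i' hii' hi'n
      rw [pvInnerA_eq_none]
      intro q hq hqpre
      have hle' : (i' : Int) ≤ PySem.Chars.rfind l q.2 := pvOccLe l q.2 i' (le_of_lt hi'n) hqpre
      have h1q : PySem.Chars.rfind l q.2 ≤ r.1 := h1 (q.1 + 1, q.2) (pvLiftE q hq)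
      omega
    rw [houter, ← hrdef, hreq]
    simp only [PySem.List.slice_zero_start]
    have hv1 : v = (k : Int) + 1 := by omega
    have hr1w : PySem.Chars.rfind l w = (i : Int) := by omega
    rw [hv1, hr1w]
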